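-- pv_equiv track=rewrite | github.com/ericka-cespedes/IntroProgrammingPY | Practica8.py | nulaAux
-- ===== SOURCE A (Python) =====
-- def nulaAux(matriz, i, j):
--     if len(matriz)==i: #Recorrio todas las filas
--         return True
--     elif len(matriz[i])==j: #Recorrio 1 fila
--         return nulaAux(matriz, i+1, 0) #reset j
--     else:
--         if matriz[i][j]!=0:
--             return False
--         else:
--             return nulaAux(matriz, i, j+1)
-- ===== SOURCE B (Python) =====
-- def nulaAux(matriz, i, j):
--     while i != len(matriz):
--         if j == len(matriz[i]):
--             i += 1
--             j = 0
--         elif matriz[i][j] != 0: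
--             return False
--         else:
--             j += 1
--     return True
-- ===== Notes on version B (the rewrite author's own statement) =====
-- stated objective: simpler
-- what changed: Replaces A's self-recursion on (i, j) with a single iterative while-loop threading the same (i, j) state, short-circuiting identically and avoiding recursion depth.
import Mathlib
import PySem

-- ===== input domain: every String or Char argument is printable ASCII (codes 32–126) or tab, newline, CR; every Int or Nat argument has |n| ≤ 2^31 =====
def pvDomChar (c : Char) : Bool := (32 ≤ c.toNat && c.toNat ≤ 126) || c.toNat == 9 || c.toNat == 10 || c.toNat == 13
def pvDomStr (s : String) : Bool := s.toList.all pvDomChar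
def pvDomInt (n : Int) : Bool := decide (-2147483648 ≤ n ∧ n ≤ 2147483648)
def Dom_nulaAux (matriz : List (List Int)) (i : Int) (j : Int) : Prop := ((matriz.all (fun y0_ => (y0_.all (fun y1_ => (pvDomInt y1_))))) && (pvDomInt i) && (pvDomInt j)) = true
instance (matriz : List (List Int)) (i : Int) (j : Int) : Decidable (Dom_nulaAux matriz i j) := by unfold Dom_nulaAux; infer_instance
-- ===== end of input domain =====

-- B replaces A's self-recursion on (i, j) by a single while-loop threading the
-- same (i, j) state (objective: simpler/iterative decomposition, same cost).

-- Fuel bound used to make both ports total: generously exceeds the number of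
-- cells the traversal can visit on any input Pre_ admits (each physical row is
-- entered at most twice, plus at most one extra row-length of steps for a
-- negative starting j).
def pvFuel (matriz : List (List Int)) : Nat :=
  3 * matriz.foldl (fun a r => a + r.length + 1) 0 + 8

-- ===== PORT A =====
-- Literal port of A's recursion; `PySem.List.pyGet? = none` is Python's
-- IndexError, excluded by Pre_nulaAux (the `true` returned there is never claimed).
def nulaAuxF (matriz : List (List Int)) : Nat → Int → Int → Bool
  | 0, _, _ => true
  | f+1, i, j =>
    if (matriz.length : Int) = i then true
    else
      match PySem.List.pyGet? matriz i with
      | none => true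
      | some row =>
        if (row.length : Int) = j then nulaAuxF matriz f (i+1) 0
        else
          match PySem.List.pyGet? row j with
          | none => true
          | some x => if x ≠ 0 then false else nulaAuxF matriz f i (j+1)

def nulaAux (matriz : List (List Int)) (i : Int) (j : Int) : Bool :=
  nulaAuxF matriz (pvFuel matriz) i j

-- ===== PORT B =====
-- One iteration of Source B's while-loop body on the state (i, j):
-- `Sum.inl` = continue with the new state, `Sum.inr` = return this value.
-- `none` cases are Python IndexErrors, excluded by Pre_nulaAux.
def nulaAuxStep (matriz : List (List Int)) (s : Int × Int) : (Int × Int) ⊕ Bool :=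
  if s.1 ≠ (matriz.length : Int) then
    match PySem.List.pyGet? matriz s.1 with
    | none => Sum.inr true
    | some row =>
      if s.2 = (row.length : Int) then Sum.inl (s.1 + 1, 0)
      else
        match PySem.List.pyGet? row s.2 with
        | none => Sum.inr true
        | some x => if x ≠ 0 then Sum.inr false else Sum.inl (s.1, s.2 + 1)
  else Sum.inr true

def nulaAuxLoop (matriz : List (List Int)) : Nat → Int × Int → Bool
  | 0, _ => true
  | f+1, s =>
    match nulaAuxStep matriz s with
    | Sum.inr b => b
    | Sum.inl s' => nulaAuxLoop matriz f s'

def nulaAux_alt (matriz : List (List Int)) (i : Int) (j : Int) : Bool :=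
  nulaAuxLoop matriz (pvFuel matriz) (i, j)

-- ===== PRECONDITION & SPEC =====
-- Pre_ excludes exactly the inputs on which the Python A raises IndexError:
-- i out of Python's (wraparound) range and not equal to len(matriz), or the
-- starting j out of range for row matriz[i] and not equal to its length.
def Pre_nulaAux (matriz : List (List Int)) (i : Int) (j : Int) : Prop :=
  i = (matriz.length : Int) ∨
    (PySem.List.pyGet? matriz i).any
      (fun row => decide (j = (row.length : Int) ∨
        (-(row.length : Int) ≤ j ∧ j < (row.length : Int)))) = true
instance (matriz : List (List Int)) (i : Int) (j : Int) : Decidable (Pre_nulaAux matriz i j) := by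
  unfold Pre_nulaAux; infer_instance

def pvWitness_nulaAux : List (List Int) × Int × Int := ([[0, 0], [0]], 0, 0)

def Spec_nulaAux (matriz : List (List Int)) (i : Int) (j : Int) (out : Bool) : Prop := out = nulaAux_alt matriz i j
instance (matriz : List (List Int)) (i : Int) (j : Int) (out : Bool) : Decidable (Spec_nulaAux matriz i j out) := by unfold Spec_nulaAux; infer_instance

-- ===== CLAIM (what is proved, stated in full; the proofs are below) =====
def Claim_equal_nulaAux : Prop := ∀ (matriz : List (List Int)) (i : Int) (j : Int), Dom_nulaAux matriz i j → Pre_nulaAux matriz i j → Spec_nulaAux matriz i j (nulaAux matriz i j)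

-- ===== LEMMAS AND PROOFS =====
-- The recursion of A and the loop of B run through the same (i, j) states:
-- step-for-step equal at every fuel level.
theorem nulaAuxF_eq_loop (matriz : List (List Int)) :
    ∀ (f : Nat) (i j : Int), nulaAuxF matriz f i j = nulaAuxLoop matriz f (i, j) := by
  intro f
  induction f with
  | zero => intro i j; rfl
  | succ f ih =>
    intro i j
    simp only [nulaAuxF, nulaAuxLoop, nulaAuxStep]
    by_cases hi : (matriz.length : Int) = i
    · simp [hi]
    · have hi' : i ≠ (matriz.length : Int) := fun h => hi h.symm
      simp only [if_neg hi, if_pos hi']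
      cases hrow : PySem.List.pyGet? matriz i with
      | none => rfl
      | some row =>
        by_cases hj : (row.length : Int) = j
        · simp [hj, ih]
        · have hj' : j ≠ (row.length : Int) := fun h => hj h.symm
          simp only [if_neg hj, if_neg hj']
          cases hx : PySem.List.pyGet? row j with
          | none => rfl
          | some x =>
            by_cases hz : x = 0
            · simp [hz, ih]
            · simp [hz]

-- ===== VERDICT (by name: the statement is the Claim_ definition above) =====
theorem nulaAux_spec : Claim_equal_nulaAux := by
  intro matriz i j _ _
  unfold Spec_nulaAux nulaAux nulaAux_alt
  exact nulaAuxF_eq_loop matriz (pvFuel matriz) i j
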